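-- pv_equiv track=rewrite | github.com/dalyosint/AffilExt | src/definition/single_cmd_scheme/math_mode.py | _split_to_math_parts
-- ===== SOURCE A (Python) =====
-- def _split_to_math_parts(cmd_content: str) -> list[str]:
--     parts = cmd_content.split(r"\\")
--     math_parts = []
--     buf = ""
--     for part in parts[::-1]:
--         if part.count("$") == 0:
--             buf = part + buf  # prepend part to previously buffered parts
--         else:
--             math_parts.append((part + buf).strip())
--             buf = ""
--
--     if buf:
--         math_parts.append(buf.strip())
--
--     return math_parts[::-1]  # reverse list as it would be the wrong way around
-- ===== SOURCE B (Python) =====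
-- def _split_to_math_parts(cmd_content: str) -> list[str]:
--     # Forward pass: collect a leading buffer before the first '$'-part, then
--     # one open segment per '$'-part that absorbs following '$'-free parts.
--     lead = ""
--     segments = []
--     current = None
--     for part in cmd_content.split(r"\\"):
--         if "$" in part:
--             if current is not None:
--                 segments.append(current)
--             current = part
--         else:
--             if current is not None:
--                 current = current + part
--             else:
--                 lead = lead + part
--     if current is not None:
--         segments.append(current)
--
--     out = [lead.strip()] if lead else []
--     out.extend(s.strip() for s in segments)
--     return out
-- ===== Notes on version B (the rewrite author's own statement) =====
-- stated objective: simpler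
-- what changed: Replaces A's reversed iteration with prepend-concatenation and a final double list reversal by a single forward left-to-right pass that keeps a leading buffer and an open segment, emitting the result in order.
import Mathlib
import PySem

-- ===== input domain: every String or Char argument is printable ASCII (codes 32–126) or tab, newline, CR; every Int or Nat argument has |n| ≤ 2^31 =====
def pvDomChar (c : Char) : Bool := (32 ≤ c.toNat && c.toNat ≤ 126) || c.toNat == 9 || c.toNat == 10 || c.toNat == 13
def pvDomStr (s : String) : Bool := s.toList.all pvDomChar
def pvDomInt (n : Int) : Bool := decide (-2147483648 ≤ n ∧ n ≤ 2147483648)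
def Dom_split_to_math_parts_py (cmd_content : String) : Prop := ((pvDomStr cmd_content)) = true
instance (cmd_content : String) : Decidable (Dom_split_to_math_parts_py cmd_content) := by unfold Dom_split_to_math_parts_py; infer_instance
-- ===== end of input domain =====

-- B replaces A's reversed iteration + double reversal by one forward pass (objective: simpler).

-- ===== PORT A =====
def split_to_math_parts_py (cmd_content : String) : List String :=
  let parts := (PySem.Str.split? cmd_content "\\\\").getD []
  -- parts[::-1] is List.reverse (PySem.List.slice?_none_none_neg_one)
  let st := parts.reverse.foldl
    (fun (st : List String × String) part =>
      if PySem.Str.count part "$" = 0 then (st.1, part ++ st.2)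
      else (st.1 ++ [PySem.Str.strip (part ++ st.2)], "")) ([], "")
  let mp := if st.2 ≠ "" then st.1 ++ [PySem.Str.strip st.2] else st.1
  mp.reverse

-- ===== PORT B =====
def split_to_math_parts_py_alt (cmd_content : String) : List String :=
  let parts := (PySem.Str.split? cmd_content "\\\\").getD []
  let st := parts.foldl
    (fun (st : String × List String × Option String) part =>
      if PySem.Str.isIn "$" part then
        match st.2.2 with
        | some cur => (st.1, st.2.1 ++ [cur], some part)
        | none => (st.1, st.2.1, some part)
      else
        match st.2.2 with
        | some cur => (st.1, st.2.1, some (cur ++ part))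
        | none => (st.1 ++ part, st.2.1, none)) ("", [], none)
  let segs := match st.2.2 with
    | some cur => st.2.1 ++ [cur]
    | none => st.2.1
  (if st.1 ≠ "" then [PySem.Str.strip st.1] else []) ++ segs.map PySem.Str.strip

-- ===== PRECONDITION & SPEC =====
def Spec_split_to_math_parts_py (cmd_content : String) (out : List String) : Prop := out = split_to_math_parts_py_alt cmd_content
instance (cmd_content : String) (out : List String) : Decidable (Spec_split_to_math_parts_py cmd_content out) := by unfold Spec_split_to_math_parts_py; infer_instance

-- ===== CLAIM (what is proved, stated in full; the proofs are below) =====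
def Claim_equal_split_to_math_parts_py : Prop := ∀ (cmd_content : String), Dom_split_to_math_parts_py cmd_content → Spec_split_to_math_parts_py cmd_content (split_to_math_parts_py cmd_content)

-- ===== LEMMAS AND PROOFS =====

-- lead/segments decomposition of the parts list (recursion from the right, matching A's foldr shape)
def pvSegsOf : List String → String × List String
  | [] => ("", [])
  | p :: rest =>
    let r := pvSegsOf rest
    if PySem.Str.isIn "$" p then ("", (p ++ r.1) :: r.2) else (p ++ r.1, r.2)

-- count.go never decreases the accumulator
theorem pv_count_go_le (sub : List Char) (fuel : Nat) :
    ∀ (l : List Char) (acc : Nat), acc ≤ PySem.Chars.count.go sub fuel l acc := by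
  induction fuel with
  | zero => intro l acc; cases l <;> simp [PySem.Chars.count.go]
  | succ n ih =>
    intro l acc
    cases l with
    | nil => simp [PySem.Chars.count.go]
    | cons h t =>
      simp only [PySem.Chars.count.go]
      split
      · exact le_trans (Nat.le_succ acc) (ih _ _)
      · exact ih _ _

theorem pv_count_go_eq_iff (sub : List Char) (hsub : sub ≠ []) (fuel : Nat) :
    ∀ (l : List Char) (acc : Nat), l.length ≤ fuel →
      (PySem.Chars.count.go sub fuel l acc = acc ↔ ¬ sub <:+: l) := by
  induction fuel with
  | zero =>
    intro l acc hl
    have : l = [] := List.eq_nil_of_length_eq_zero (Nat.le_zero.mp hl)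
    subst this
    simp [PySem.Chars.count.go, List.infix_nil, hsub]
  | succ n ih =>
    intro l acc hl
    cases l with
    | nil => simp [PySem.Chars.count.go, List.infix_nil, hsub]
    | cons h t =>
      simp only [PySem.Chars.count.go]
      split
      · rename_i hp
        have hpref : sub <+: (h :: t) := List.isPrefixOf_iff_prefix.mp hp
        constructor
        · intro habs
          have := pv_count_go_le sub n (List.drop sub.length (h :: t)) (acc + 1)
          omega
        · intro habs; exact absurd hpref.isInfix habs
      · rename_i hp
        have hnp : ¬ sub <+: (h :: t) := fun hc => hp (List.isPrefixOf_iff_prefix.mpr hc)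
        rw [ih t acc (by simpa using Nat.lt_succ_iff.mp (by simpa using Nat.lt_of_lt_of_le (by simp) hl))]
        constructor
        · intro hni hc
          rcases List.infix_cons_iff.mp hc with h1 | h2
          · exact hnp h1
          · exact hni h2
        · intro hni hc; exact hni (List.infix_cons_iff.mpr (Or.inr hc))

-- A's branch condition (part.count("$") == 0) is exactly B's ("$" in part) negated
theorem pv_count_dollar_eq_zero_iff (p : String) :
    PySem.Str.count p "$" = 0 ↔ ¬ PySem.Str.isIn "$" p := by
  rw [PySem.Str.count_eq]
  have hsub : ("$" : String).toList ≠ [] := by decide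
  constructor
  · intro h hin
    have hinf := (PySem.Str.isIn_iff_infix _ _).mp hin
    have := (pv_count_go_eq_iff ("$".toList) hsub p.toList.length p.toList 0 le_rfl)
    simp only [PySem.Chars.count] at h
    rw [if_neg (by simp)] at h
    exact (this.mp h) hinf
  · intro hin
    have hninf : ¬ ("$" : String).toList <:+: p.toList := fun hc =>
      hin ((PySem.Str.isIn_iff_infix _ _).mpr hc)
    simp only [PySem.Chars.count]
    rw [if_neg (by simp)]
    exact (pv_count_go_eq_iff ("$".toList) hsub p.toList.length p.toList 0 le_rfl).mpr hninf

-- A's reversed fold computes (stripped segments reversed, lead)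
theorem pv_A_state (ps : List String) :
    ps.reverse.foldl
      (fun (st : List String × String) part =>
        if PySem.Str.count part "$" = 0 then (st.1, part ++ st.2)
        else (st.1 ++ [PySem.Str.strip (part ++ st.2)], "")) ([], "")
    = (((pvSegsOf ps).2.map PySem.Str.strip).reverse, (pvSegsOf ps).1) := by
  rw [List.foldl_reverse]
  induction ps with
  | nil => simp [pvSegsOf]
  | cons p rest ih =>
    simp only [List.foldr_cons, ih, pvSegsOf]
    by_cases hin : PySem.Str.isIn "$" p
    · rw [if_neg (fun h => (pv_count_dollar_eq_zero_iff p).mp h hin), if_pos hin]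
      simp
    · rw [if_pos ((pv_count_dollar_eq_zero_iff p).mpr hin), if_neg hin]

-- close B's state: flush the open segment
def pvClose (st : String × List String × Option String) : String × List String :=
  (st.1, match st.2.2 with
         | some cur => st.2.1 ++ [cur]
         | none => st.2.1)

theorem pv_B_state (ps : List String) :
    ∀ (lead : String) (segs : List String) (cur : Option String),
    pvClose (ps.foldl
      (fun (st : String × List String × Option String) part =>
        if PySem.Str.isIn "$" part then
          match st.2.2 with
          | some cur => (st.1, st.2.1 ++ [cur], some part)
          | none => (st.1, st.2.1, some part)
        else
          match st.2.2 with
          | some cur => (st.1, st.2.1, some (cur ++ part))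
          | none => (st.1 ++ part, st.2.1, none)) (lead, segs, cur))
    = match cur with
      | some c => (lead, segs ++ (c ++ (pvSegsOf ps).1) :: (pvSegsOf ps).2)
      | none => (lead ++ (pvSegsOf ps).1, segs ++ (pvSegsOf ps).2) := by
  induction ps with
  | nil =>
    intro lead segs cur
    cases cur <;> simp [pvClose, pvSegsOf]
  | cons p rest ih =>
    intro lead segs cur
    simp only [List.foldl_cons, pvSegsOf]
    by_cases hin : PySem.Str.isIn "$" p
    · rw [if_pos hin]
      cases cur with
      | some c =>
        simp only [ih, if_pos hin]
        cases hr : pvSegsOf rest with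
        | mk l ss => simp
      | none =>
        simp only [ih, if_pos hin]
        cases hr : pvSegsOf rest with
        | mk l ss => simp
    · rw [if_neg hin]
      cases cur with
      | some c =>
        simp only [ih, if_neg hin]
        cases hr : pvSegsOf rest with
        | mk l ss => simp [String.append_assoc]
      | none =>
        simp only [ih, if_neg hin]
        cases hr : pvSegsOf rest with
        | mk l ss => simp [String.append_assoc]

-- ===== VERDICT (by name: the statement is the Claim_ definition above) =====
theorem split_to_math_parts_py_spec : Claim_equal_split_to_math_parts_py := by
  intro cmd_content _
  unfold Spec_split_to_math_parts_py split_to_math_parts_py split_to_math_parts_py_alt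
  simp only [pv_A_state]
  set ps := (PySem.Str.split? cmd_content "\\\\").getD [] with hps
  have hB := pv_B_state ps "" [] none
  simp only [pvClose] at hB
  cases hst : (ps.foldl
      (fun (st : String × List String × Option String) part =>
        if PySem.Str.isIn "$" part then
          match st.2.2 with
          | some cur => (st.1, st.2.1 ++ [cur], some part)
          | none => (st.1, st.2.1, some part)
        else
          match st.2.2 with
          | some cur => (st.1, st.2.1, some (cur ++ part))
          | none => (st.1 ++ part, st.2.1, none)) ("", [], none)) with
  | mk lead rest =>
    rw [hst] at hB
    simp only at hB
    have hlead : lead = (pvSegsOf ps).1 := by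
      have := congrArg Prod.fst hB; simpa using this
    have hsegs : (match rest.2 with
        | some cur => rest.1 ++ [cur]
        | none => rest.1) = (pvSegsOf ps).2 := by
      have := congrArg Prod.snd hB; simpa using this
    rw [hlead, hsegs]
    by_cases hne : (pvSegsOf ps).1 = ""
    · simp [hne]
    · simp [hne]
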